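-- pv_equiv track=rewrite | github.com/luzalbaposse/TD-1-IntroduccionALaProgramacion | Material/clases-practicas/P11-tuplas-conjuntos-diccionarios/P11-tuplas-conjuntos-diccionarios-solucion.py | dnis_mellizos
-- ===== SOURCE A (Python) =====
-- from typing import List, Tuple, Set, Dict
--
-- def dnis_mellizos(personas:List[Tuple[str, int, int]]) -> Dict[int, List[Tuple[str, int]]]:
-- 	dict_personas:Dict[int, List[Tuple[str, int]]] = dict()
-- 	persona:Tuple[str, int, int]
-- 	for persona in personas:
-- 		if persona[1] in dict_personas.keys():
-- 			dict_personas[persona[1]].append((persona[0], persona[2]))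
-- 		else:
-- 			dict_personas[persona[1]] = [(persona[0], persona[2])]
--
-- 	dict_dnis_mell:Dict[int, List[Tuple[str, int]]] = dict()
-- 	clave:int
-- 	valor:List[Tuple[str, int]]
-- 	for clave, valor in dict_personas.items():
-- 		if len(valor) > 1:
-- 			dict_dnis_mell[clave] = valor
-- 	return dict_dnis_mell
-- ===== SOURCE B (Python) =====
-- def dnis_mellizos(personas):
--     # First pass: count how many people share each DNI.
--     counts = {}
--     for persona in personas:
--         counts[persona[1]] = counts.get(persona[1], 0) + 1
--     # Second pass: build only the qualifying groups, in first-appearance order.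
--     mellizos = {}
--     for persona in personas:
--         if counts[persona[1]] > 1:
--             mellizos.setdefault(persona[1], []).append((persona[0], persona[2]))
--     return mellizos
-- ===== Notes on version B (the rewrite author's own statement) =====
-- stated objective: alternative
-- what changed: A builds the full group list for every DNI and then filters the groups; B first builds a count table of DNIs and then, in a second filtered pass over the people, builds only the groups whose DNI count exceeds 1, so no intermediate groups for unique DNIs are ever materialised.
import Mathlib
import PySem

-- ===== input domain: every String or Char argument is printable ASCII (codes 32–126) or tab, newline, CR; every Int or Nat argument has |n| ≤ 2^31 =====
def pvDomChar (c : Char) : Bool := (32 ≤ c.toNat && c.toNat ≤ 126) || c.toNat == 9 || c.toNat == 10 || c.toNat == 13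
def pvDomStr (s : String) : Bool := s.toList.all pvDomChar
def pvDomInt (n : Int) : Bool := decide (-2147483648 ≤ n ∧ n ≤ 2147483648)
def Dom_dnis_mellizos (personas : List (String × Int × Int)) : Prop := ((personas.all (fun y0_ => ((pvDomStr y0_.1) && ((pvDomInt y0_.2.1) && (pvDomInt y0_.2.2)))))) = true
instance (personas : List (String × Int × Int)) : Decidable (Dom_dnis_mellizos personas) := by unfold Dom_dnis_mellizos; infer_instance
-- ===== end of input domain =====

-- B counts DNIs first and then builds only the qualifying groups in one filtered pass,
-- instead of A's "build every group, then filter all groups"; same return value.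

-- ===== PORT A =====
def dnis_mellizos (personas : List (String × Int × Int)) : List (Int × List (String × Int)) :=
  -- first loop: group every persona by its DNI
  let dict_personas : PySem.Dict Int (List (String × Int)) :=
    personas.foldl (fun d p =>
      if d.contains p.2.1 then
        -- dict_personas[persona[1]].append(...): the key is present, so getD is exact here
        d.insert p.2.1 (d.getD p.2.1 [] ++ [(p.1, p.2.2)])
      else
        d.insert p.2.1 [(p.1, p.2.2)]) PySem.Dict.empty
  -- second loop: keep the groups with more than one member
  let dict_dnis_mell : PySem.Dict Int (List (String × Int)) :=
    dict_personas.items.foldl (fun acc kv =>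
      if kv.2.length > 1 then acc.insert kv.1 kv.2 else acc) PySem.Dict.empty
  dict_dnis_mell.items

-- ===== PORT B =====
def dnis_mellizos_alt (personas : List (String × Int × Int)) : List (Int × List (String × Int)) :=
  -- first pass: count how many people share each DNI
  let counts : PySem.Dict Int Int :=
    personas.foldl (fun d p => d.insert p.2.1 (d.getD p.2.1 0 + 1)) PySem.Dict.empty
  -- second pass: counts[persona[1]] always exists, so getD is exact here;
  -- mellizos.setdefault(k, []).append(x) is exactly modify k [] (· ++ [x])
  let mellizos : PySem.Dict Int (List (String × Int)) :=
    personas.foldl (fun r p =>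
      if counts.getD p.2.1 0 > 1 then r.modify p.2.1 [] (· ++ [(p.1, p.2.2)]) else r)
      PySem.Dict.empty
  mellizos.items

-- ===== PRECONDITION & SPEC =====
def Spec_dnis_mellizos (personas : List (String × Int × Int)) (out : List (Int × List (String × Int))) : Prop := out = dnis_mellizos_alt personas
instance (personas : List (String × Int × Int)) (out : List (Int × List (String × Int))) : Decidable (Spec_dnis_mellizos personas out) := by unfold Spec_dnis_mellizos; infer_instance

-- ===== CLAIM (what is proved, stated in full; the proofs are below) =====
def Claim_equal_dnis_mellizos : Prop := ∀ (personas : List (String × Int × Int)), Dom_dnis_mellizos personas → Spec_dnis_mellizos personas (dnis_mellizos personas)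

-- ===== LEMMAS AND PROOFS =====

theorem pvDedupAppendSingleton {α : Type} [BEq α] [LawfulBEq α] (xs : List α) (x : α) :
    PySem.List.dedup (xs ++ [x]) = if x ∈ xs then PySem.List.dedup xs else PySem.List.dedup xs ++ [x] := by
  have h : PySem.List.dedup (xs ++ [x]) = PySem.Set.add (PySem.List.dedup xs) x := by
    simp [PySem.List.dedup_eq_ofList, PySem.Set.ofList_eq_foldl, List.foldl_append, PySem.Set.add]
  rw [h]
  by_cases hm : x ∈ xs
  · simp [PySem.Set.add, PySem.Set.contains, hm]
  · simp [PySem.Set.add, PySem.Set.contains, hm]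

-- a loop whose body fires only when q holds is a loop over the filtered list
theorem pvFoldlIf {α β : Type} (q : α → Bool) (f : β → α → β) :
    ∀ (l : List α) (init : β),
      l.foldl (fun acc x => if q x then f acc x else acc) init = (l.filter q).foldl f init := by
  intro l
  induction l with
  | nil => intro init; rfl
  | cons x t ih =>
    intro init
    by_cases hx : q x = true
    · simp [hx, ih]
    · simp [hx, ih]

theorem pvDedupFilter {α : Type} [BEq α] [LawfulBEq α] (Q : α → Bool) (xs : List α) :
    PySem.List.dedup (xs.filter Q) = (PySem.List.dedup xs).filter Q := by
  induction xs using List.reverseRecOn with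
  | nil => rfl
  | append_singleton ys x ih =>
    rw [List.filter_append, pvDedupAppendSingleton ys x]
    by_cases hq : Q x = true
    · have hx1 : List.filter Q [x] = [x] := by simp [hq]
      rw [hx1, pvDedupAppendSingleton (ys.filter Q) x]
      by_cases hm : x ∈ ys
      · have : x ∈ ys.filter Q := List.mem_filter.2 ⟨hm, hq⟩
        rw [if_pos this, if_pos hm, ih]
      · have : x ∉ ys.filter Q := fun hc => hm (List.mem_filter.1 hc).1
        rw [if_neg this, if_neg hm, ih, List.filter_append, hx1]
    · have hx0 : List.filter Q [x] = [] := by simp [hq]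
      rw [hx0, List.append_nil, ih]
      by_cases hm : x ∈ ys
      · rw [if_pos hm]
      · rw [if_neg hm, List.filter_append, hx0, List.append_nil]

-- items of the grouping fold: one entry per DNI in first-appearance order
theorem pvItemsGroupFold (l : List (String × Int × Int)) :
    (l.foldl (fun d p => d.modify p.2.1 ([] : List (String × Int)) (· ++ [(p.1, p.2.2)]))
        PySem.Dict.empty).items
      = (PySem.List.dedup (l.map (·.2.1))).map
          (fun k => (k, (l.filter (fun p => p.2.1 == k)).map (fun p => (p.1, p.2.2)))) := by
  induction l using List.reverseRecOn with
  | nil => rfl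
  | append_singleton t p ih =>
    simp only [List.foldl_append, List.map_append, List.map_cons, List.map_nil,
      List.foldl_cons, List.foldl_nil]
    rw [pvDedupAppendSingleton]
    set D := t.foldl (fun d q => d.modify q.2.1 ([] : List (String × Int)) (· ++ [(q.1, q.2.2)]))
        PySem.Dict.empty with hD
    have hkeys : D.keys = PySem.List.dedup (t.map (·.2.1)) := by
      show D.items.map Prod.fst = _
      rw [ih, List.map_map]; simp [Function.comp_def]
    have hnd : D.keys.Nodup := by rw [hkeys]; exact PySem.List.nodup_dedup _
    by_cases hm : p.2.1 ∈ t.map (·.2.1)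
    · -- key already present: the insert overwrites its entry in place
      have hmem : (p.2.1, (t.filter (fun q => q.2.1 == p.2.1)).map (fun q => (q.1, q.2.2))) ∈ D.items := by
        rw [ih]
        exact List.mem_map_of_mem ((PySem.List.mem_dedup _ _).2 hm)
      have hc : D.contains p.2.1 = true := (PySem.Dict.contains_iff_mem_keys D p.2.1).2
        (by rw [hkeys]; exact (PySem.List.mem_dedup _ _).2 hm)
      have hget : D.getD p.2.1 [] = (t.filter (fun q => q.2.1 == p.2.1)).map (fun q => (q.1, q.2.2)) :=
        PySem.Dict.getD_of_mem_items D hmem hnd []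
      show (D.insert p.2.1 ((D.getD p.2.1 []) ++ [(p.1, p.2.2)])).items = _
      rw [PySem.Dict.items_insert_of_contains D _ hc, ih, if_pos hm, List.map_map]
      refine List.map_congr_left ?_
      intro k hk
      by_cases hkp : k = p.2.1
      · subst hkp
        simp only [Function.comp, beq_self_eq_true, if_pos, List.filter_append, hget]
        simp
      · have : (k == p.2.1) = false := beq_eq_false_iff_ne.2 hkp
        have hnil : List.filter (fun q => q.2.1 == k) [p] = [] := by
          simp [beq_eq_false_iff_ne.2 (fun h : p.2.1 = k => hkp h.symm)]
        simp only [Function.comp, this, Bool.false_eq_true, List.filter_append, hnil,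
          List.append_nil, if_false]
    · -- fresh key: the insert appends a new entry
      have hc : D.contains p.2.1 = false := by
        rw [← Bool.not_eq_true]
        intro hcc
        exact hm (by
          have := (PySem.Dict.contains_iff_mem_keys D p.2.1).1 hcc
          rw [hkeys] at this
          exact (PySem.List.mem_dedup _ _).1 this)
      have hget : D.getD p.2.1 [] = [] := PySem.Dict.getD_of_not_contains D [] hc
      show (D.insert p.2.1 ((D.getD p.2.1 []) ++ [(p.1, p.2.2)])).items = _
      rw [PySem.Dict.items_insert_of_not_contains D _ hc, ih, if_neg hm, List.map_append]
      congr 1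
      · refine List.map_congr_left ?_
        intro k hk
        have hkt : k ∈ t.map (·.2.1) := (PySem.List.mem_dedup _ _).1 hk
        have hkp : k ≠ p.2.1 := fun h => hm (h ▸ hkt)
        rw [List.filter_append]
        have hnil : List.filter (fun q => q.2.1 == k) [p] = [] := by
          simp [beq_eq_false_iff_ne.2 (fun h : p.2.1 = k => hkp h.symm)]
        rw [hnil, List.append_nil]
      · have hnil : t.filter (fun q => q.2.1 == p.2.1) = [] := by
          rw [List.filter_eq_nil_iff]
          intro q hq hqb
          exact hm (List.mem_map.2 ⟨q, hq, by simpa using hqb⟩)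
        simp [hget, List.filter_append, hnil]

-- A's second loop: inserting pairwise-distinct fresh keys under a test is a filter
theorem pvItemsFilterFold (P : Int × List (String × Int) → Bool) :
    ∀ (l : List (Int × List (String × Int))) (d : PySem.Dict Int (List (String × Int))),
      (∀ kv ∈ l, d.contains kv.1 = false) → (l.map Prod.fst).Nodup →
      (l.foldl (fun acc kv => if P kv then acc.insert kv.1 kv.2 else acc) d).items
        = d.items ++ l.filter P := by
  intro l
  induction l with
  | nil => intro d _ _; simp
  | cons kv t ih =>
    intro d hfresh hnd
    simp only [List.foldl_cons, List.filter_cons]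
    by_cases hp : P kv = true
    · rw [if_pos hp, if_pos hp]
      have hc : d.contains kv.1 = false := hfresh kv (List.mem_cons_self ..)
      have hnd0 : kv.1 ∉ t.map Prod.fst ∧ (t.map Prod.fst).Nodup :=
        List.nodup_cons.1 (List.map_cons .. ▸ hnd)
      have hfresh' : ∀ q ∈ t, (d.insert kv.1 kv.2).contains q.1 = false := by
        intro q hq
        rw [PySem.Dict.contains_insert]
        have h1 : (q.1 == kv.1) = false :=
          beq_eq_false_iff_ne.2 (fun h => hnd0.1 (h ▸ List.mem_map_of_mem hq))
        rw [h1, hfresh q (List.mem_cons_of_mem _ hq)]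
        rfl
      rw [ih _ hfresh' hnd0.2, PySem.Dict.items_insert_of_not_contains d kv.2 hc]
      simp
    · rw [if_neg hp, if_neg hp]
      exact ih d (fun q hq => hfresh q (List.mem_cons_of_mem _ hq))
        (List.nodup_cons.1 (List.map_cons .. ▸ hnd)).2

-- ===== VERDICT (by name: the statement is the Claim_ definition above) =====
theorem pvGroupLen (personas : List (String × Int × Int)) (k : Int) :
    ((personas.filter (fun p => p.2.1 == k)).map (fun p => (p.1, p.2.2))).length
      = (personas.map (·.2.1)).count k := by
  rw [List.length_map, ← List.countP_eq_length_filter, List.count_eq_countP, List.countP_map]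
  rfl

theorem dnis_mellizos_spec : Claim_equal_dnis_mellizos := by
  intro personas _
  show dnis_mellizos personas = dnis_mellizos_alt personas
  -- A's first loop body is exactly modify k [] (· ++ [x])
  have hfunA : (fun (d : PySem.Dict Int (List (String × Int))) (p : String × Int × Int) =>
      if d.contains p.2.1 then d.insert p.2.1 (d.getD p.2.1 [] ++ [(p.1, p.2.2)])
      else d.insert p.2.1 [(p.1, p.2.2)])
      = fun d p => d.modify p.2.1 ([] : List (String × Int)) (· ++ [(p.1, p.2.2)]) := by
    funext d p
    by_cases hc : d.contains p.2.1 = true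
    · rw [if_pos hc]; rfl
    · rw [if_neg hc]
      show d.insert p.2.1 [(p.1, p.2.2)] = d.insert p.2.1 ((d.getD p.2.1 []) ++ [(p.1, p.2.2)])
      rw [PySem.Dict.getD_of_not_contains d [] (by simpa using hc)]
      rfl
  -- A in closed form
  have hA : dnis_mellizos personas
      = ((PySem.List.dedup (personas.map (·.2.1))).map
          (fun k => (k, (personas.filter (fun p => p.2.1 == k)).map (fun p => (p.1, p.2.2))))).filter
          (fun kv => decide (kv.2.length > 1)) := by
    simp only [dnis_mellizos]
    rw [hfunA, pvItemsGroupFold]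
    have hfunP : (fun (acc : PySem.Dict Int (List (String × Int))) (kv : Int × List (String × Int)) =>
        if kv.2.length > 1 then acc.insert kv.1 kv.2 else acc)
        = fun acc kv => if (fun kv : Int × List (String × Int) => decide (kv.2.length > 1)) kv = true
            then acc.insert kv.1 kv.2 else acc := by
      funext acc kv; by_cases h : kv.2.length > 1 <;> simp [h]
    have hfresh : ∀ kv ∈ (PySem.List.dedup (personas.map (·.2.1))).map
        (fun k => (k, (personas.filter (fun p => p.2.1 == k)).map (fun p => (p.1, p.2.2)))),
        (PySem.Dict.empty : PySem.Dict Int (List (String × Int))).contains kv.1 = false := by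
      intro kv _; rfl
    have hnd : (((PySem.List.dedup (personas.map (·.2.1))).map
        (fun k => (k, (personas.filter (fun p => p.2.1 == k)).map (fun p => (p.1, p.2.2))))).map
          Prod.fst).Nodup := by
      rw [List.map_map]
      simp only [Function.comp_def, List.map_id_fun', id]
      exact PySem.List.nodup_dedup (personas.map (·.2.1))
    rw [hfunP, pvItemsFilterFold _ _ _ hfresh hnd]
    rfl
  -- B's counter
  have hcounts : ∀ k, (personas.foldl (fun d p => d.insert p.2.1 (d.getD p.2.1 0 + 1))
      (PySem.Dict.empty : PySem.Dict Int Int)).getD k 0 = ((personas.map (·.2.1)).count k : Int) := by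
    intro k
    rw [(List.foldl_map (f := fun x : String × Int × Int => x.2.1)
      (g := fun (d : PySem.Dict Int Int) x => d.insert x (d.getD x 0 + 1))
      (l := personas) (init := PySem.Dict.empty)).symm]
    rw [PySem.Dict.getD_foldl_insert_add_one]
    simp
  -- B in closed form
  have hB : dnis_mellizos_alt personas
      = (PySem.List.dedup ((personas.filter
            (fun p => decide ((personas.map (·.2.1)).count p.2.1 > 1))).map (·.2.1))).map
          (fun k => (k, ((personas.filter (fun p => decide ((personas.map (·.2.1)).count p.2.1 > 1))).filter
              (fun p => p.2.1 == k)).map (fun p => (p.1, p.2.2)))) := by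
    simp only [dnis_mellizos_alt]
    have hfunB : (fun (r : PySem.Dict Int (List (String × Int))) (p : String × Int × Int) =>
        if (personas.foldl (fun d p => d.insert p.2.1 (d.getD p.2.1 0 + 1))
            (PySem.Dict.empty : PySem.Dict Int Int)).getD p.2.1 0 > 1
          then r.modify p.2.1 ([] : List (String × Int)) (· ++ [(p.1, p.2.2)]) else r)
        = fun r p => if (fun p : String × Int × Int =>
              decide ((personas.map (·.2.1)).count p.2.1 > 1)) p = true
            then r.modify p.2.1 ([] : List (String × Int)) (· ++ [(p.1, p.2.2)]) else r := by
      funext r p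
      simp only [hcounts]
      by_cases h : (personas.map (·.2.1)).count p.2.1 > 1
      · rw [if_pos (by exact_mod_cast h), if_pos (by simpa using h)]
      · rw [if_neg (by exact_mod_cast h), if_neg (by simpa using h)]
    rw [hfunB, pvFoldlIf, pvItemsGroupFold]
  rw [hA, hB]
  -- both sides are maps over the qualifying first-appearance DNIs
  have hmapfilter : (personas.filter
        (fun p => decide ((personas.map (·.2.1)).count p.2.1 > 1))).map (·.2.1)
      = (personas.map (·.2.1)).filter (fun k => decide ((personas.map (·.2.1)).count k > 1)) := by
    rw [List.filter_map]; rfl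
  rw [hmapfilter, pvDedupFilter, List.filter_map]
  have hpred : ∀ k ∈ PySem.List.dedup (personas.map (·.2.1)),
      ((fun kv : Int × List (String × Int) => decide (kv.2.length > 1)) ∘
        (fun k => (k, (personas.filter (fun p => p.2.1 == k)).map (fun p => (p.1, p.2.2))))) k
      = (fun k => decide ((personas.map (·.2.1)).count k > 1)) k := by
    intro k _
    simp only [Function.comp_apply]
    rw [pvGroupLen]
  rw [List.filter_congr hpred]
  refine List.map_congr_left ?_
  intro k hk
  have hQ : decide ((personas.map (·.2.1)).count k > 1) = true := (List.mem_filter.1 hk).2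
  have hfil : (personas.filter
        (fun p => decide ((personas.map (·.2.1)).count p.2.1 > 1))).filter (fun p => p.2.1 == k)
      = personas.filter (fun p => p.2.1 == k) := by
    rw [List.filter_filter]
    refine List.filter_congr ?_
    intro p _
    by_cases hpk : p.2.1 = k
    · simp only [hpk, hQ, beq_self_eq_true, Bool.true_and]
    · simp [beq_eq_false_iff_ne.2 hpk]
  rw [hfil]
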